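-- pv_equiv track=rewrite | github.com/alexandraback/datacollection | solutions_5634697451274240_0/Python/roy999/main.py | solve
-- ===== SOURCE A (Python) =====
-- def solve(state, offset=None, target="+"):
--     if offset is None:
--         offset = len(state)
--
--     if offset == 0:
--         return 0
--     elif state[offset - 1] == target:
--         return solve(state, offset - 1, target)
--     else:
--         return solve(state, offset - 1, state[offset - 1]) + 1
-- ===== SOURCE B (Python) =====
-- def solve(state, offset=None, target="+"):
--     if offset is None:
--         offset = len(state)
--     count = 0
--     cur = target
--     for i in range(offset - 1, -1, -1):
--         if state[i] != cur:
--             count += 1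
--             cur = state[i]
--     return count
-- ===== Notes on version B (the rewrite author's own statement) =====
-- stated objective: simpler
-- what changed: Replaced A's chain of recursive calls (one stack frame per character, rebinding the target argument) with a single iterative right-to-left loop carrying a count and the current character.
import Mathlib
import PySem

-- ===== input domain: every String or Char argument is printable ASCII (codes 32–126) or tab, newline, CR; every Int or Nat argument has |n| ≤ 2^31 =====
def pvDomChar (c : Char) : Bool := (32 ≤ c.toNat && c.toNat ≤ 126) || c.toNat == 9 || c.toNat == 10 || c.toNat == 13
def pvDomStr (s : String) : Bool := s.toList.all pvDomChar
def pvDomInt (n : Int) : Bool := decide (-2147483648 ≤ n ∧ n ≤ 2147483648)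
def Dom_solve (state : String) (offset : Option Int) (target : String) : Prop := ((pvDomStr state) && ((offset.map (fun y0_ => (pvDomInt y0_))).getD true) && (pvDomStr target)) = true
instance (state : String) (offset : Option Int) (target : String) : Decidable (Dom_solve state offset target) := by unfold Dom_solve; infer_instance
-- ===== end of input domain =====

-- B replaces A's recursion (one call frame per character, rebinding target) with a single
-- iterative right-to-left loop carrying a count and the current character (objective: simpler).

-- ===== PORT A =====
-- A's recursion, with the Int offset (nonnegative under Pre_solve) as a Nat.
def solveRec (state : String) (off : Nat) (target : String) : Int :=
  match off with
  | 0 => 0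
  | Nat.succ n =>
    match PySem.Str.pyGet? state (n : Int) with
    | none => 0  -- state[offset-1] raises IndexError in Python: excluded by Pre_solve
    | some c =>
      if String.mk [c] == target then solveRec state n target
      else solveRec state n (String.mk [c]) + 1

def solve (state : String) (offset : Option Int) (target : String) : Int :=
  let off : Int := match offset with | none => (state.toList.length : Int) | some o => o
  if _h : 0 ≤ off then solveRec state off.toNat target
  else 0  -- negative offset: Python A raises IndexError; excluded by Pre_solve

-- ===== PORT B =====
def solve_alt (state : String) (offset : Option Int) (target : String) : Int :=
  let off : Int := match offset with | none => (state.toList.length : Int) | some o => o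
  ((PySem.List.pyRange (off - 1) (-1) (-1)).foldl
    (fun (acc : Int × String) i =>
      match PySem.Str.pyGet? state i with
      | none => acc  -- state[i] raises IndexError in Python: excluded by Pre_solve
      | some c => if String.mk [c] == acc.2 then acc else (acc.1 + 1, String.mk [c]))
    (0, target)).1

-- ===== PRECONDITION & SPEC =====
-- Pre_solve excludes exactly the offsets on which Python A raises IndexError:
-- an explicit offset below 0 or above len(state).
def Pre_solve (state : String) (offset : Option Int) (target : String) : Prop :=
  0 ≤ offset.getD (state.toList.length : Int) ∧
    offset.getD (state.toList.length : Int) ≤ (state.toList.length : Int)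
instance (state : String) (offset : Option Int) (target : String) : Decidable (Pre_solve state offset target) := by unfold Pre_solve; infer_instance

def pvWitness_solve : String × Option Int × String := ("+-+", some 2, "+")

def Spec_solve (state : String) (offset : Option Int) (target : String) (out : Int) : Prop := out = solve_alt state offset target
instance (state : String) (offset : Option Int) (target : String) (out : Int) : Decidable (Spec_solve state offset target out) := by unfold Spec_solve; infer_instance

-- ===== CLAIM (what is proved, stated in full; the proofs are below) =====
def Claim_equal_solve : Prop := ∀ (state : String) (offset : Option Int) (target : String), Dom_solve state offset target → Pre_solve state offset target → Spec_solve state offset target (solve state offset target)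

-- ===== LEMMAS AND PROOFS =====

-- B's loop body, abstracted over the string being indexed.
def bStep (state : String) (acc : Int × String) (i : Int) : Int × String :=
  match PySem.Str.pyGet? state i with
  | none => acc
  | some c => if String.mk [c] == acc.2 then acc else (acc.1 + 1, String.mk [c])

-- The count component of B's fold is affine in its initial count.
theorem foldl_bStep_fst_add (state : String) (l : List Int) :
    ∀ (c : Int) (t : String),
      (l.foldl (bStep state) (c, t)).1 = c + (l.foldl (bStep state) (0, t)).1 := by
  induction l with
  | nil => intro c t; simp
  | cons i l ih =>
    intro c t
    simp only [List.foldl_cons, bStep]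
    cases PySem.Str.pyGet? state i with
    | none => exact ih c t
    | some ch =>
      by_cases h : (String.mk [ch] == t) = true
      · simp only [h, if_pos]
        exact ih c t
      · simp only [h, if_neg, Bool.not_eq_true]
        rw [ih (c + 1), ih (0 + 1)]
        ring
  
-- A's recursion equals B's countdown fold, for any in-range offset.
theorem solveRec_eq_fold (state : String) :
    ∀ (k : Nat) (t : String), k ≤ state.toList.length →
      solveRec state k t =
        ((PySem.List.pyRange ((k : Int) - 1) (-1) (-1)).foldl (bStep state) (0, t)).1 := by
  intro k
  induction k with
  | zero =>
    intro t _
    have : PySem.List.pyRange (((0 : Nat) : Int) - 1) (-1) (-1) = [] :=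
      PySem.List.pyRange_neg_one_eq_nil (by norm_num)
    rw [this]
    simp [solveRec]
  | succ n ih =>
    intro t hk
    have h1 : ((n + 1 : Nat) : Int) - 1 = (n : Int) := by push_cast; ring
    rw [h1, PySem.List.pyRange_neg_one_cons (by omega : (-1 : Int) < (n : Int))]
    have hget : PySem.Str.pyGet? state ((n : Nat) : Int) = some (state.toList[n]'(by omega)) := by
      simp [PySem.Str.pyGet?_natCast, List.getElem?_eq_getElem (by omega : n < state.toList.length)]
    simp only [List.foldl_cons, bStep, hget]
    set c := state.toList[n]'(by omega) with hc
    by_cases h : (String.mk [c] == t) = true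
    · simp only [h, if_pos]
      rw [solveRec, hget]
      simp only [h, if_pos]
      exact ih t (by omega)
    · simp only [h, if_neg, Bool.not_eq_true]
      rw [solveRec, hget]
      simp only [h, if_neg, Bool.not_eq_true]
      rw [ih (String.mk [c]) (by omega)]
      rw [foldl_bStep_fst_add state (PySem.List.pyRange ((n : Int) - 1) (-1) (-1)) (0 + 1) (String.mk [c])]
      omega

-- ===== VERDICT (by name: the statement is the Claim_ definition above) =====
theorem solve_spec : Claim_equal_solve := by
  intro state offset target _ hpre
  unfold Spec_solve solve solve_alt
  obtain ⟨h0, hlen⟩ := hpre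
  cases offset with
  | none =>
    simp only [Option.getD] at h0 hlen ⊢
    rw [dif_pos (by exact_mod_cast Nat.zero_le _)]
    rw [Int.toNat_natCast]
    exact solveRec_eq_fold state state.toList.length target (le_refl _)
  | some o =>
    simp only [Option.getD] at h0 hlen ⊢
    rw [dif_pos h0]
    have ho : ((o.toNat : Nat) : Int) = o := Int.toNat_of_nonneg h0
    rw [show o - 1 = ((o.toNat : Nat) : Int) - 1 by rw [ho]]
    exact solveRec_eq_fold state o.toNat target (by omega)
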